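-- pv_equiv track=rewrite | github.com/pandas-dev/pandas | venv/lib/python3.12/site-packages/numba/tests/test_lists.py | list_setitem
-- ===== SOURCE A (Python) =====
-- def list_setitem(n):
--     l = list(range(n))
--     res = 0
--     # Positive indices
--     for i in range(len(l)):
--         l[i] = i * l[i]
--     # Negative indices
--     for i in range(-len(l), 0):
--         l[i] = i * l[i]
--     for i in range(len(l)):
--         res += l[i]
--     return res
-- ===== SOURCE B (Python) =====
-- def list_setitem(n):
--     # Closed form: after both passes l[p] == (p - n) * p*p, so the sum is
--     # sum(p**3) - n*sum(p**2) over p in range(n), via power-sum formulas.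
--     if n <= 0:
--         return 0
--     s2 = (n - 1) * n * (2 * n - 1) // 6
--     s3 = ((n - 1) * n // 2) ** 2
--     return s3 - n * s2
-- ===== Notes on version B (the rewrite author's own statement) =====
-- stated objective: faster
-- what changed: Replaced the three O(n) list passes with an O(1) closed-form polynomial: the final list entry at p is (p-n)*p^2, so the sum is sum(p^3)-n*sum(p^2), computed by the power-sum formulas.
import Mathlib
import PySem

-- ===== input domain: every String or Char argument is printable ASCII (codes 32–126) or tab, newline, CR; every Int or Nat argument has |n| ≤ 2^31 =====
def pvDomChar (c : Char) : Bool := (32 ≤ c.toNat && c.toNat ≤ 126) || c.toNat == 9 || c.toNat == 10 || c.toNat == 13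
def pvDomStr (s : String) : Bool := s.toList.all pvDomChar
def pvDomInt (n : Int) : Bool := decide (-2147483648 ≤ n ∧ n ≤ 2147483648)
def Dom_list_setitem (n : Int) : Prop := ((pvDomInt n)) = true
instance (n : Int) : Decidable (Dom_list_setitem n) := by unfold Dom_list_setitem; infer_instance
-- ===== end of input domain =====

-- B replaces A's three O(n) list passes by an O(1) closed-form polynomial
-- (power-sum formulas); same return value for every n.

-- ===== PORT A =====
-- Literal port of A: l = list(range(n)); a setitem pass over positive indices,
-- a setitem pass over negative indices, then an index loop summing the entries.
def list_setitem (n : Int) : Int :=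
  let l0 := PySem.List.pyRange 0 n 1
  let l1 := (PySem.List.pyRange 0 (l0.length : Int) 1).foldl
      (fun l i => PySem.List.pySetD l i (i * PySem.List.pyGetD l i 0)) l0
  let l2 := (PySem.List.pyRange (-(l1.length : Int)) 0 1).foldl
      (fun l i => PySem.List.pySetD l i (i * PySem.List.pyGetD l i 0)) l1
  (PySem.List.pyRange 0 (l2.length : Int) 1).foldl
      (fun res i => res + PySem.List.pyGetD l2 i 0) 0

-- ===== PORT B =====
def list_setitem_alt (n : Int) : Int :=
  if n ≤ 0 then 0
  else
    let s2 := PySem.Int.floordiv ((n - 1) * n * (2 * n - 1)) 6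
    let s3 := (PySem.Int.floordiv ((n - 1) * n) 2) ^ 2
    s3 - n * s2

-- ===== PRECONDITION & SPEC =====
def Spec_list_setitem (n : Int) (out : Int) : Prop := out = list_setitem_alt n
instance (n : Int) (out : Int) : Decidable (Spec_list_setitem n out) := by unfold Spec_list_setitem; infer_instance

-- ===== CLAIM (what is proved, stated in full; the proofs are below) =====
def Claim_equal_list_setitem : Prop := ∀ (n : Int), Dom_list_setitem n → Spec_list_setitem n (list_setitem n)

-- ===== LEMMAS AND PROOFS =====

-- A setitem pass over positive indices pre.length .. L-1 rewrites exactly the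
-- suffix, position k getting f k (old value).
theorem pass_pos (f : Int → Int → Int) (post : List Int) : ∀ (pre : List Int),
    (PySem.List.pyRange (pre.length : Int) ((pre.length + post.length : Nat) : Int) 1).foldl
      (fun l i => PySem.List.pySetD l i (f i (PySem.List.pyGetD l i 0))) (pre ++ post)
    = pre ++ post.mapIdx (fun k x => f ((pre.length + k : Nat) : Int) x) := by
  induction post with
  | nil => intro pre; simp [PySem.List.pyRange_one_eq_nil]
  | cons x rest ih =>
    intro pre
    rw [PySem.List.pyRange_one_cons (by simp), List.foldl_cons]
    have hget : PySem.List.pyGetD (pre ++ x :: rest) ((pre.length : Nat) : Int) 0 = x := by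
      simp [List.getD_eq_getElem?_getD]
    have hset : PySem.List.pySetD (pre ++ x :: rest) ((pre.length : Nat) : Int)
        (f (pre.length : Int) x) = (pre ++ [f (pre.length : Int) x]) ++ rest := by
      simp
    rw [hget, hset]
    have hlen : ((pre.length : Int) + 1) = (((pre ++ [f (pre.length : Int) x]).length : Nat) : Int) := by
      simp
    have hlen2 : ((pre.length + (x :: rest).length : Nat) : Int)
        = (((pre ++ [f (pre.length : Int) x]).length + rest.length : Nat) : Int) := by
      simp; omega
    rw [hlen, hlen2, ih (pre ++ [f (pre.length : Int) x])]
    rw [List.mapIdx_cons]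
    have hfun : (fun (i : Nat) (x' : Int) => f ((pre.length + (i + 1) : Nat) : Int) x')
        = fun (i : Nat) (x' : Int) => f (((pre ++ [f (pre.length : Int) x]).length + i : Nat) : Int) x' := by
      funext i x'; congr 2; simp; omega
    rw [hfun]
    simp

-- Python's negative-index setitem: xs[-k] = v is set at position length - k.
theorem pySetD_neg (xs : List Int) (k : Nat) (v : Int) (h1 : 0 < k) (h2 : k ≤ xs.length) :
    PySem.List.pySetD xs (-(k : Int)) v = xs.set (xs.length - k) v := by
  simp only [PySem.List.pySetD, PySem.List.pySet?, PySem.List.pyIdx?]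
  rw [if_neg (by omega), if_pos (by omega)]
  simp

-- A setitem pass over negative indices pre.length - L .. -1 (on a list of
-- length L) touches the same positions left to right, with index k - L.
theorem pass_neg (f : Int → Int → Int) (post : List Int) : ∀ (pre : List Int) (L : Nat),
    pre.length + post.length = L →
    (PySem.List.pyRange ((pre.length : Int) - (L : Int)) 0 1).foldl
      (fun l i => PySem.List.pySetD l i (f i (PySem.List.pyGetD l i 0))) (pre ++ post)
    = pre ++ post.mapIdx (fun k x => f (((pre.length + k : Nat) : Int) - (L : Int)) x) := by
  induction post with
  | nil =>
    intro pre L hL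
    simp only [List.length_nil, Nat.add_zero] at hL
    have h0 : ((pre.length : Int) - L) = 0 := by omega
    rw [h0]
    simp [PySem.List.pyRange_one_eq_nil]
  | cons x rest ih =>
    intro pre L hL
    simp only [List.length_cons] at hL
    have hpre : pre.length < L := by omega
    have hk : ((pre.length : Int) - L) = -((L - pre.length : Nat) : Int) := by omega
    have hxs : (pre ++ x :: rest).length = L := by simp; omega
    rw [PySem.List.pyRange_one_cons (by omega), List.foldl_cons, hk]
    have hget : PySem.List.pyGetD (pre ++ x :: rest) (-((L - pre.length : Nat) : Int)) 0 = x := by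
      rw [PySem.List.pyGetD_neg_natCast _ _ _ (by omega) (by omega)]
      have hidx : (pre ++ x :: rest).length - (L - pre.length) = pre.length := by simp; omega
      rw [getElem_congr rfl hidx (hidx ▸ (by simp; omega)), List.getElem_append_right (le_refl _)]
      simp
    have hset : PySem.List.pySetD (pre ++ x :: rest) (-((L - pre.length : Nat) : Int))
        (f (-((L - pre.length : Nat) : Int)) x) = (pre ++ [f (-((L - pre.length : Nat) : Int)) x]) ++ rest := by
      rw [pySetD_neg _ _ _ (by omega) (by omega)]
      have hidx : (pre ++ x :: rest).length - (L - pre.length) = pre.length := by simp; omega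
      rw [hidx, List.set_append, if_neg (by omega)]
      simp
    rw [hget, hset]
    have ha : (-((L - pre.length : Nat) : Int)) + 1
        = (((pre ++ [f (-((L - pre.length : Nat) : Int)) x]).length : Nat) : Int) - L := by
      simp; omega
    rw [ha, ih _ L (by simp; omega)]
    rw [List.mapIdx_cons]
    have hfun : (fun (i : Nat) (x' : Int) => f (((pre.length + (i + 1) : Nat) : Int) - (L : Int)) x')
        = fun (i : Nat) (x' : Int) =>
            f ((((pre ++ [f (-((L - pre.length : Nat) : Int)) x]).length + i : Nat) : Int) - (L : Int)) x' := by
      funext i x'; congr 2; simp; omega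
    rw [hfun]
    simp
    congr 1
    omega

-- mapIdx over a mapped range is a map over the range.
theorem mapIdx_map_range (g : Nat → Int) (h : Nat → Int → Int) (m : Nat) :
    ((List.range m).map g).mapIdx h = (List.range m).map (fun k => h k (g k)) := by
  induction m with
  | zero => simp
  | succ p ih =>
    rw [List.range_succ, List.map_append, List.mapIdx_append, ih, List.map_append]
    simp

theorem sum_lin (m : Nat) :
    2 * ((List.range m).map (fun (k : Nat) => (k : Int))).sum = ((m : Int) - 1) * m := by
  induction m with
  | zero => simp
  | succ p ih =>
    rw [List.range_succ, List.map_append, List.sum_append, List.map_singleton, List.sum_singleton]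
    push_cast
    linear_combination ih

theorem sum_sq (m : Nat) :
    6 * ((List.range m).map (fun (k : Nat) => ((k : Int)) ^ 2)).sum = ((m : Int) - 1) * m * (2 * m - 1) := by
  induction m with
  | zero => simp
  | succ p ih =>
    rw [List.range_succ, List.map_append, List.sum_append, List.map_singleton, List.sum_singleton]
    push_cast
    linear_combination ih

theorem sum_cube (m : Nat) :
    4 * ((List.range m).map (fun (k : Nat) => ((k : Int)) ^ 3)).sum = (((m : Int) - 1) * m) ^ 2 := by
  induction m with
  | zero => simp
  | succ p ih =>
    rw [List.range_succ, List.map_append, List.sum_append, List.map_singleton, List.sum_singleton]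
    push_cast
    linear_combination ih

-- ===== VERDICT (by name: the statement is the Claim_ definition above) =====
theorem list_setitem_spec : Claim_equal_list_setitem := by
  intro n _
  unfold Spec_list_setitem list_setitem list_setitem_alt
  by_cases hn : n ≤ 0
  · simp [PySem.List.pyRange_one_eq_nil hn, PySem.List.pyRange_one_eq_nil (le_refl (0:Int)), hn]
  · rw [if_neg hn]
    push Not at hn
    set m := n.toNat with hm
    have hnm : n = (m : Int) := by omega
    have hm0 : 0 < m := by omega
    -- the initial list
    have hl0 : PySem.List.pyRange 0 n 1 = (List.range m).map (fun (k : Nat) => (k : Int)) := by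
      rw [PySem.List.pyRange_one]
      simp [hnm]
    rw [hl0]
    have h1 := pass_pos (fun i x => i * x) ((List.range m).map (fun (k : Nat) => (k : Int))) []
    simp only [List.length_nil, Nat.zero_add, List.nil_append, Nat.cast_zero] at h1
    simp only [h1]
    rw [mapIdx_map_range (fun k => (k : Int)) (fun k x => (k : Int) * x) m]
    have h2 := pass_neg (fun i x => i * x) ((List.range m).map (fun (k : Nat) => (k : Int) * k)) [] m
      (by simp)
    simp only [List.length_nil, Nat.zero_add, List.nil_append, Nat.cast_zero, zero_sub] at h2
    have hlen1 : (((List.range m).map (fun (k : Nat) => (k : Int) * k)).length : Int) = (m : Int) := by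
      simp
    rw [hlen1, h2]
    rw [mapIdx_map_range (fun (k : Nat) => (k : Int) * k) (fun k x => ((k : Int) - m) * x) m]
    rw [PySem.List.foldl_pyRange_zero_pyGetD' ((List.range m).map (fun (k : Nat) => ((k : Int) - m) * ((k : Int) * k))) 0 (fun a b => a + b) 0]
    rw [show ∀ (l : List Int), l.foldl (fun a b => a + b) 0 = l.sum from fun l => Eq.symm List.sum_eq_foldl]
    have hterm : (fun (k : Nat) => ((k : Int) - m) * ((k : Int) * k))
        = fun (k : Nat) => ((k : Int)) ^ 3 + (-(m : Int)) * ((k : Int)) ^ 2 := by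
      funext k; ring
    rw [hterm, PySem.List.sum_map_add_int, PySem.List.sum_map_const_mul_int]
    have hS2 : PySem.Int.floordiv ((n - 1) * n * (2 * n - 1)) 6
        = ((List.range m).map (fun (k : Nat) => ((k : Int)) ^ 2)).sum := by
      rw [hnm, show (((m : Int)) - 1) * m * (2 * m - 1) = 6 * ((List.range m).map (fun (k : Nat) => ((k : Int)) ^ 2)).sum from (sum_sq m).symm]
      rw [PySem.Int.floordiv_eq_ediv_of_pos (by norm_num)]
      exact Int.mul_ediv_cancel_left _ (by norm_num)
    have hS1 : PySem.Int.floordiv ((n - 1) * n) 2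
        = ((List.range m).map (fun (k : Nat) => (k : Int))).sum := by
      rw [hnm, show (((m : Int)) - 1) * m = 2 * ((List.range m).map (fun (k : Nat) => (k : Int))).sum from (sum_lin m).symm]
      rw [PySem.Int.floordiv_eq_ediv_of_pos (by norm_num)]
      exact Int.mul_ediv_cancel_left _ (by norm_num)
    have hS3 : ((List.range m).map (fun (k : Nat) => ((k : Int)) ^ 3)).sum
        = (((List.range m).map (fun (k : Nat) => (k : Int))).sum) ^ 2 := by
      have h4 : 4 * ((List.range m).map (fun (k : Nat) => ((k : Int)) ^ 3)).sum
          = 4 * ((((List.range m).map (fun (k : Nat) => (k : Int))).sum) ^ 2) := by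
        rw [sum_cube m, show (((m : Int)) - 1) * m = 2 * ((List.range m).map (fun (k : Nat) => (k : Int))).sum from (sum_lin m).symm]
        ring
      linarith
    rw [hS2, hS1, hS3, hnm]
    ring
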